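-- pv_equiv track=rewrite | github.com/unixenon/ipv6-rib-mapping | Map IPv6 Prefixes.py | path_to_ipv6_cidr
-- ===== SOURCE A (Python) =====
-- import ipaddress
--
-- def path_to_ipv6_cidr(arr):
--     if len(arr) > 64:
--         raise ValueError("Array too long: max 64 values (2 bits each)")
--     for x in arr:
--         if x < 0 or x > 3:
--             raise ValueError("Array values must be in range 0–3")
--
--     # Pack 2-bit symbols into a 128-bit integer (MSB-first)
--     value = 0
--     for x in arr:
--         value = (value << 2) | x
--
--     # Move packed bits to the top of 128 bits
--     value <<= (128 - 2 * len(arr))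
--
--     prefix_len = 2 * len(arr)
--     ipv6_str = str(ipaddress.IPv6Address(value))
--     return f"{ipv6_str}/{prefix_len}"
-- ===== SOURCE B (Python) =====
-- def path_to_ipv6_cidr(arr):
--     if len(arr) > 64:
--         raise ValueError("Array too long: max 64 values (2 bits each)")
--     for x in arr:
--         if x < 0 or x > 3:
--             raise ValueError("Array values must be in range 0\u20133")
--
--     # Place each 2-bit symbol positionally into a fixed 16-byte buffer
--     ba = bytearray(16)
--     for i, x in enumerate(arr):
--         ba[i // 4] += x << (3 - i % 4) * 2
--
--     # Render the 128-bit address (RFC 5952: strip leading zeros per hextet,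
--     # compress the first longest run of two or more zero hextets)
--     n = int.from_bytes(bytes(ba), 'big')
--     hextets = [format(n // 65536 ** (7 - k) % 65536, 'x') for k in range(8)]
--     best_start, best_len, cur_start, cur_len = -1, 0, -1, 0
--     for idx, h in enumerate(hextets):
--         if h == '0':
--             cur_len += 1
--             if cur_start == -1:
--                 cur_start = idx
--             if cur_len > best_len:
--                 best_start, best_len = cur_start, cur_len
--         else:
--             cur_start, cur_len = -1, 0
--     if best_len > 1:
--         end = best_start + best_len
--         if end == 8:
--             hextets += ['']
--         hextets = hextets[:best_start] + [''] + hextets[end:]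
--         if best_start == 0:
--             hextets = [''] + hextets
--     return f"{':'.join(hextets)}/{2 * len(arr)}"
-- ===== Notes on version B (the rewrite author's own statement) =====
-- stated objective: alternative
-- what changed: A folds all symbols into one accumulating big integer with shift-or and shifts it to the top of 128 bits at the end; B instead allocates a fixed 16-byte buffer, adds each 2-bit symbol positionally into byte i//4 at bit offset (3-i%4)*2, and formats the RFC 5952 address text itself from the packed bytes instead of calling ipaddress.
import Mathlib
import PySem

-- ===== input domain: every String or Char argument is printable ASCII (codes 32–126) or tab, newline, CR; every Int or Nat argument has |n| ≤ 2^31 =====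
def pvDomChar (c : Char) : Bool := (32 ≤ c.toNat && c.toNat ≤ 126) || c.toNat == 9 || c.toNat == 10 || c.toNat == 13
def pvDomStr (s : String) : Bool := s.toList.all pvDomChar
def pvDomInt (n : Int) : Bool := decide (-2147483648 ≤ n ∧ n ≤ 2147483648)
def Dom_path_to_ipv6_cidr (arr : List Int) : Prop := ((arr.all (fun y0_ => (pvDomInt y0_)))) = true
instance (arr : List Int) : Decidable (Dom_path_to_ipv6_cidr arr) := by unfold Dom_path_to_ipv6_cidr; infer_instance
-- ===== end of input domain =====

-- B replaces A's fold of one accumulating 128-bit integer (shifted up at the end) by a fixed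
-- 16-byte buffer addressed positionally: each 2-bit symbol is added into byte i//4 at its bit
-- offset; objective: alternative (a positional data-structure formulation, same cost).

-- ===== shared helpers: the RFC 5952 text form (leading zeros stripped per hextet, first
-- longest run of two or more zero hextets compressed to '::'). A reaches it through
-- str(ipaddress.IPv6Address(value)) (CPython's _string_from_ip_int, ported step for step);
-- B's hand-written formatting loop is line for line that same algorithm, so the one
-- transliteration pvCompress serves both ports. Exact for 0 <= value < 2^128.
def pvHextetStr (m : Nat) : String := String.ofList (Nat.toDigits 16 m)   -- '%x' % m

def pvCompress (hextets : List String) : String :=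
  -- state = (best_doublecolon_start, best_doublecolon_len, doublecolon_start, doublecolon_len)
  let st := (PySem.List.enumerate hextets 0).foldl
    (fun (s : Int × Int × Int × Int) (p : Int × String) =>
      if p.2 = "0" then
        let cl := s.2.2.2 + 1
        let cs := if s.2.2.1 = -1 then p.1 else s.2.2.1
        if cl > s.2.1 then (cs, cl, cs, cl) else (s.1, s.2.1, cs, cl)
      else (s.1, s.2.1, -1, 0))
    (-1, 0, -1, 0)
  if st.2.1 > 1 then
    let ed := st.1 + st.2.1
    let hextets := if ed = 8 then hextets ++ [""] else hextets
    let parts := hextets.take st.1.toNat ++ [""] ++ hextets.drop ed.toNat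
    let parts := if st.1 = 0 then "" :: parts else parts
    PySem.Str.join ":" parts
  else PySem.Str.join ":" hextets

def pvIPv6Str (n : Nat) : String :=
  pvCompress ((List.range 8).map (fun k => pvHextetStr (n / 65536 ^ (7 - k) % 65536)))

-- ===== PORT A =====
def path_to_ipv6_cidr (arr : List Int) : String :=
  -- value = (value << 2) | x, MSB-first fold into one integer
  let value := arr.foldl (fun v x => PySem.Int.bor (v <<< (2:Nat)) x) 0
  -- value <<= (128 - 2*len(arr)): nonnegative shift whenever the length guard passed (Pre_)
  let value := value <<< (128 - 2 * arr.length)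
  pvIPv6Str value.toNat ++ "/" ++ PySem.Int.toStr (2 * (arr.length : Int))

-- ===== PORT B =====
-- ba[i // 4] += x << (3 - i % 4) * 2   (shift amount is nonnegative, hence the toNat is exact)
def pvB_step (b : List Int) (p : Int × Int) : List Int :=
  PySem.List.pySetD b (PySem.Int.floordiv p.1 4)
    (PySem.List.pyGetD b (PySem.Int.floordiv p.1 4) 0 +
      (p.2 <<< ((3 - PySem.Int.mod p.1 4) * 2).toNat))

def path_to_ipv6_cidr_alt (arr : List Int) : String :=
  let ba := (PySem.List.enumerate arr 0).foldl pvB_step (List.replicate 16 (0 : Int))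
  -- n = int.from_bytes(bytes(ba), 'big'): the 16 bytes folded big-endian
  let n := ba.foldl (fun a c => a * 256 + c) 0
  -- hextets: format(m, 'x') on a nonnegative int is pvHextetStr m.toNat
  let hextets := (List.range 8).map (fun k =>
    pvHextetStr (PySem.Int.mod (PySem.Int.floordiv n ((65536 : Int) ^ (7 - k))) 65536).toNat)
  pvCompress hextets ++ "/" ++ PySem.Int.toStr (2 * (arr.length : Int))

-- ===== PRECONDITION & SPEC =====
-- Pre_ = exactly the inputs where A returns (no ValueError): at most 64 symbols, each in 0..3.
def Pre_path_to_ipv6_cidr (arr : List Int) : Prop :=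
  arr.length ≤ 64 ∧ ∀ x ∈ arr, 0 ≤ x ∧ x ≤ 3
instance (arr : List Int) : Decidable (Pre_path_to_ipv6_cidr arr) := by
  unfold Pre_path_to_ipv6_cidr; infer_instance
def pvWitness_path_to_ipv6_cidr : List Int := [1, 2, 3, 0, 0, 3]

def Spec_path_to_ipv6_cidr (arr : List Int) (out : String) : Prop := out = path_to_ipv6_cidr_alt arr
instance (arr : List Int) (out : String) : Decidable (Spec_path_to_ipv6_cidr arr out) := by unfold Spec_path_to_ipv6_cidr; infer_instance

-- ===== CLAIM (what is proved, stated in full; the proofs are below) =====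
def Claim_equal_path_to_ipv6_cidr : Prop := ∀ (arr : List Int), Dom_path_to_ipv6_cidr arr → Pre_path_to_ipv6_cidr arr → Spec_path_to_ipv6_cidr arr (path_to_ipv6_cidr arr)

-- ===== LEMMAS AND PROOFS =====

theorem pvFoldl_affine (t : List Int) : ∀ a c : Int,
    t.foldl (fun a c => a * 256 + c) (a + c) =
      t.foldl (fun a c => a * 256 + c) a + c * 256 ^ t.length := by
  induction t with
  | nil => intro a c; simp
  | cons h t ih =>
    intro a c
    simp only [List.foldl_cons, List.length_cons]
    have e : (a + c) * 256 + h = (a * 256 + h) + c * 256 := by ring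
    rw [e, ih]
    ring

theorem pvFoldl_set (b : List Int) : ∀ (j : Nat) (d a : Int), j < b.length →
    (b.set j (b.getD j 0 + d)).foldl (fun a c => a * 256 + c) a =
      b.foldl (fun a c => a * 256 + c) a + d * 256 ^ (b.length - 1 - j) := by
  induction b with
  | nil => intro j d a h; simp at h
  | cons h t ih =>
    intro j d a hj
    cases j with
    | zero =>
      simp only [List.getD, List.set, List.foldl_cons, List.length_cons, List.getElem?_cons_zero,
        Option.getD_some]
      have e : a * 256 + (h + d) = (a * 256 + h) + d := by ring
      rw [e, pvFoldl_affine]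
      simp
    | succ j =>
      simp only [List.getD_cons_succ, List.set_cons_succ, List.foldl_cons, List.length_cons]
      rw [ih j d (a * 256 + h) (by simpa using hj)]
      have : t.length + 1 - 1 - (j + 1) = t.length - 1 - j := by omega
      rw [this]

theorem pvA_step (v x : Int) (hv : 0 ≤ v) (hx : 0 ≤ x) (hx3 : x ≤ 3) :
    PySem.Int.bor (v <<< (2:Nat)) x = v * 4 + x := by
  have h2 : v <<< (2:Nat) = v * 4 := by rw [Int.shiftLeft_eq]; norm_num
  rw [h2, PySem.Int.bor_of_nonneg (by omega) hx]
  have ht : (v * 4).toNat = v.toNat <<< 2 := by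
    rw [Nat.shiftLeft_eq]; omega
  have hlt : x.toNat < 2 ^ 2 := by omega
  rw [ht, ← Nat.shiftLeft_add_eq_or_of_lt hlt]
  omega
theorem pvA_fold_eq (l : List Int) (hl : ∀ x ∈ l, 0 ≤ x ∧ x ≤ 3) :
    ∀ v : Int, 0 ≤ v →
      l.foldl (fun v x => PySem.Int.bor (v <<< (2:Nat)) x) v = l.foldl (fun v x => v * 4 + x) v := by
  induction l with
  | nil => intro v _; rfl
  | cons h t ih =>
    intro v hv
    have hh := hl h (by simp)
    simp only [List.foldl_cons]
    rw [pvA_step v h hv hh.1 hh.2]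
    exact ih (fun x hx => hl x (by simp [hx])) _ (by omega)

theorem pvB_len (ps : List (Int × Int)) : ∀ b : List Int, (ps.foldl pvB_step b).length = b.length := by
  induction ps with
  | nil => intro b; rfl
  | cons p t ih =>
    intro b
    simp only [List.foldl_cons, ih, pvB_step, PySem.List.length_pySetD]

theorem pvB_step_val (b : List Int) (k : Nat) (x : Int) (hb : b.length = 16) (hk : k < 64) :
    (pvB_step b ((k : Int), x)).foldl (fun a c => a * 256 + c) 0 =
      b.foldl (fun a c => a * 256 + c) 0 + x * 2 ^ (126 - 2 * k) := by
  have hq : k / 4 < b.length := by omega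
  have hmod : PySem.Int.mod (k : Int) 4 = ((k % 4 : Nat) : Int) := by
    exact_mod_cast PySem.Int.mod_natCast k 4
  have hdiv : PySem.Int.floordiv (k : Int) 4 = ((k / 4 : Nat) : Int) := by
    exact_mod_cast PySem.Int.floordiv_natCast k 4
  have hsh : ((3 - ((k % 4 : Nat) : Int)) * 2).toNat = 6 - 2 * (k % 4) := by omega
  simp only [pvB_step, hdiv, hmod, hsh, PySem.List.pySetD_natCast, PySem.List.pyGetD_natCast]
  rw [Int.shiftLeft_eq]
  rw [pvFoldl_set b (k/4) (x * 2 ^ (6 - 2 * (k % 4))) 0 hq]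
  congr 1
  have h256 : (256 : Int) = 2 ^ 8 := by norm_num
  rw [h256, ← pow_mul, mul_assoc, ← pow_add]
  congr 2
  omega

theorem pvMain (l : List Int) (hlen : l.length ≤ 64) :
    ((PySem.List.enumerate l 0).foldl pvB_step (List.replicate 16 (0 : Int))).foldl
        (fun a c => a * 256 + c) 0 =
      l.foldl (fun v x => v * 4 + x) 0 * 2 ^ (128 - 2 * l.length) := by
  induction l using List.reverseRecOn with
  | nil => decide
  | append_singleton l x ih =>
    have hl : l.length ≤ 63 := by simp at hlen; omega
    rw [PySem.List.enumerate_append, List.foldl_append, List.foldl_append]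
    have he : PySem.List.enumerate [x] (0 + (l.length : Int)) = [((l.length : Int), x)] := by
      simp [PySem.List.enumerate_cons, PySem.List.enumerate_nil]
    rw [he]
    simp only [List.foldl_cons, List.foldl_nil]
    rw [pvB_step_val _ l.length x (by rw [pvB_len]; simp) (by omega)]
    rw [ih (by omega)]
    simp only [List.length_append, List.length_cons, List.length_nil]
    have e1 : 128 - 2 * l.length = (126 - 2 * l.length) + 2 := by omega
    have e2 : 128 - 2 * (l.length + 0 + 1) = 126 - 2 * l.length := by omega
    rw [e1, e2, pow_add]
    ring

theorem pvPack_nonneg (l : List Int) (hl : ∀ x ∈ l, 0 ≤ x) :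
    ∀ v : Int, 0 ≤ v → 0 ≤ l.foldl (fun v x => v * 4 + x) v := by
  induction l with
  | nil => intro v hv; exact hv
  | cons h t ih =>
    intro v hv
    have hh := hl h (by simp)
    simp only [List.foldl_cons]
    exact ih (fun x hx => hl x (by simp [hx])) _ (by omega)

-- B reads hextet k with Python // and % on the Int; A's port reads it with Nat / and %
theorem pvGroup_eq (n : Int) (hn : 0 ≤ n) (k : Nat) :
    (PySem.Int.mod (PySem.Int.floordiv n ((65536 : Int) ^ (7 - k))) 65536).toNat =
      n.toNat / 65536 ^ (7 - k) % 65536 := by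
  obtain ⟨m, rfl⟩ := Int.eq_ofNat_of_zero_le hn
  have e : ((65536 : Int) ^ (7 - k)) = (((65536 ^ (7 - k) : Nat)) : Int) := by push_cast; ring
  rw [e, PySem.Int.floordiv_natCast]
  have e2 : (65536 : Int) = ((65536 : Nat) : Int) := by norm_num
  rw [e2, PySem.Int.mod_natCast]
  exact Int.toNat_natCast _

-- ===== VERDICT (by name: the statement is the Claim_ definition above) =====
theorem path_to_ipv6_cidr_spec : Claim_equal_path_to_ipv6_cidr := by
  intro arr _ hpre
  unfold Spec_path_to_ipv6_cidr path_to_ipv6_cidr path_to_ipv6_cidr_alt pvIPv6Str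
  have h1 := pvA_fold_eq arr hpre.2 0 le_rfl
  have h2 := pvMain arr hpre.1
  have hnn : 0 ≤ arr.foldl (fun v x => v * 4 + x) 0 * 2 ^ (128 - 2 * arr.length) :=
    mul_nonneg (pvPack_nonneg arr (fun x hx => (hpre.2 x hx).1) 0 le_rfl) (by positivity)
  simp only [Int.shiftLeft_eq] at h1
  simp only [Int.shiftLeft_eq, h1, h2]
  have hmap :
      (List.range 8).map (fun k =>
        pvHextetStr ((arr.foldl (fun v x => v * 4 + x) 0 * 2 ^ (128 - 2 * arr.length)).toNat /
          65536 ^ (7 - k) % 65536)) =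
      (List.range 8).map (fun k =>
        pvHextetStr ((PySem.Int.mod (PySem.Int.floordiv
          (arr.foldl (fun v x => v * 4 + x) 0 * 2 ^ (128 - 2 * arr.length))
          ((65536 : Int) ^ (7 - k))) 65536).toNat)) :=
    List.map_congr_left (fun k _ => by rw [pvGroup_eq _ hnn k])
  rw [hmap]
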